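-- pv_equiv track=rewrite | github.com/kuku1234us/music-player | music_player/models/StreamPicker.py | _norm_lang
-- ===== SOURCE A (Python) =====
-- from typing import Any, Optional
--
-- def _norm_lang(lang: Any) -> str:
--     """
--     Normalize language tags like:
--     - "en", "en-US", "en_US", "EN-us" -> "en-us"
--     """
--     s = str(lang or "").strip()
--     if not s:
--         return ""
--     s = s.replace("_", "-").lower()
--     # Collapse accidental repeats like "en--us"
--     while "--" in s:
--         s = s.replace("--", "-")
--     return s
-- ===== SOURCE B (Python) =====
-- def _norm_lang(lang) -> str:
--     s = str(lang or "").strip()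
--     if not s:
--         return ""
--     s = s.replace("_", "-").lower()
--     # one forward pass: drop a '-' whenever the last emitted char is '-'
--     out = []
--     for ch in s:
--         if ch == '-' and out and out[-1] == '-':
--             continue
--         out.append(ch)
--     return "".join(out)
-- ===== Notes on version B (the rewrite author's own statement) =====
-- stated objective: simpler
-- what changed: The repeated whole-string `while '--' in s: s = s.replace('--','-')` rescan loop is replaced by a single forward pass that appends each character unless it is a '-' following an emitted '-'.
import Mathlib
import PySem

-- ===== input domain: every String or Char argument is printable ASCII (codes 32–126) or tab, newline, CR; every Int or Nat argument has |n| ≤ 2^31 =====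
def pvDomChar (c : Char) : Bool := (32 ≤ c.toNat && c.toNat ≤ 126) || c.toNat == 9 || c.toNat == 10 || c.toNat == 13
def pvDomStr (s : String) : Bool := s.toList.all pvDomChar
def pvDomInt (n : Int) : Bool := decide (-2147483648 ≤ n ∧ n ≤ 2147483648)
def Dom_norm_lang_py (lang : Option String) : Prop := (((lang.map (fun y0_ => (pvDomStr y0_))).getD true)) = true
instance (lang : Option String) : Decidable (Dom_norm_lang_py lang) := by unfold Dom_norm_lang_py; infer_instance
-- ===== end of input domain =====

-- B replaces A's repeated whole-string rescan loop (`while '--' in s: s = s.replace('--','-')`)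
-- by one forward pass that drops a '-' following an emitted '-'; objective: simpler (one pass).

-- ===== PORT A =====
-- helpers used only so the port's `while` loop can cite a termination fact by name:
-- `rep l` is what one Python `s.replace("--", "-")` pass produces (proved below as replace_eq_rep).
def rep : List Char → List Char
  | [] => []
  | '-' :: '-' :: t => '-' :: rep t
  | c :: t => c :: rep t

theorem rep_two (t : List Char) : rep ('-' :: '-' :: t) = '-' :: rep t := rep.eq_2 t

theorem rep_cons_ne (c : Char) (t : List Char)
    (h : ∀ t1, c = '-' → t = '-' :: t1 → False) : rep (c :: t) = c :: rep t :=
  rep.eq_3 c t h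

theorem rep_length_le (l : List Char) : (rep l).length ≤ l.length := by
  fun_induction rep l <;> simp_all <;> omega

theorem rep_length_lt (l : List Char) (h : ['-', '-'] <:+: l) : (rep l).length < l.length := by
  fun_induction rep l with
  | case1 => simp at h
  | case2 t ih =>
    have := rep_length_le t
    simp; omega
  | case3 c t hne ih =>
    rcases (List.infix_cons_iff).1 h with hp | hi
    · rcases hp with ⟨r, hr⟩
      simp only [List.cons_append, List.nil_append] at hr
      injection hr with h1 h2
      exact (hne r h1.symm h2.symm).elim
    · have h1 := ih hi
      simp; omega

theorem replace_go_eq_rep (fuel : Nat) (l acc : List Char) (h : l.length ≤ fuel) :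
    PySem.Chars.replace.go ['-', '-'] ['-'] fuel l acc = acc.reverse ++ rep l := by
  induction fuel generalizing l acc with
  | zero =>
    have : l = [] := by cases l <;> simp_all
    subst this; simp [PySem.Chars.replace.go, rep]
  | succ n ih =>
    cases l with
    | nil => simp [PySem.Chars.replace.go, rep]
    | cons c t =>
      rw [PySem.Chars.replace.go]
      by_cases hp : List.isPrefixOf ['-', '-'] (c :: t) = true
      · rcases t with _ | ⟨b, u⟩
        · simp [List.isPrefixOf] at hp
        · have hc : '-' = c ∧ '-' = b := by simpa [List.isPrefixOf] using hp
          obtain ⟨hc1, hc2⟩ := hc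
          subst hc1; subst hc2
          simp only [hp, if_true]
          have hd : List.drop (['-', '-'] : List Char).length ('-' :: '-' :: u) = u := rfl
          have hr : (['-'] : List Char).reverse ++ acc = '-' :: acc := rfl
          rw [hd, hr, ih u ('-' :: acc) (by simp at h ⊢; omega)]
          rw [rep_two]; simp
      · simp only [hp, if_false]
        rw [ih t (c :: acc) (by simp at h ⊢; omega)]
        rw [rep_cons_ne c t (fun t1 h1 h2 => hp (by simp [h1, h2, List.isPrefixOf]))]
        simp
theorem replace_eq_rep (l : List Char) :
    PySem.Chars.replace l ['-', '-'] ['-'] = rep l := by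
  simp [PySem.Chars.replace]
  exact replace_go_eq_rep l.length l [] le_rfl

theorem replace_lt (l : List Char) (h : PySem.Chars.isIn ['-', '-'] l = true) :
    (PySem.Chars.replace l ['-', '-'] ['-']).length < l.length := by
  rw [replace_eq_rep]
  exact rep_length_lt l ((PySem.Chars.isIn_iff_infix _ _).1 h)

-- A's `while "--" in s: s = s.replace("--", "-")` loop, on the character list
def collapseLoopA (s : List Char) : List Char :=
  if h : PySem.Chars.isIn ['-', '-'] s = true then
    collapseLoopA (PySem.Chars.replace s ['-', '-'] ['-'])
  else s
termination_by s.length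
decreasing_by exact replace_lt s h

def norm_lang_py (lang : Option String) : String :=
  -- s = str(lang or "").strip()
  let s0 : String := match lang with | none => "" | some v => if v == "" then "" else v
  let s : String := PySem.Str.strip s0
  if s == "" then ""
  else
    -- s = s.replace("_", "-").lower(); while "--" in s: s = s.replace("--", "-")
    let s2 := PySem.Str.lower (PySem.Str.replace s "_" "-")
    String.ofList (collapseLoopA s2.toList)

-- ===== PORT B =====
def norm_lang_py_alt (lang : Option String) : String :=
  let s0 : String := match lang with | none => "" | some v => if v == "" then "" else v
  let s : String := PySem.Str.strip s0
  if s == "" then ""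
  else
    let s2 := PySem.Str.lower (PySem.Str.replace s "_" "-")
    -- one forward pass: append ch unless ch == '-' and the last appended char is '-'
    String.ofList (s2.toList.foldl
      (fun out ch => if ch == '-' && out.getLast? == some '-' then out else out ++ [ch]) [])

-- ===== PRECONDITION & SPEC =====
def Spec_norm_lang_py (lang : Option String) (out : String) : Prop := out = norm_lang_py_alt lang
instance (lang : Option String) (out : String) : Decidable (Spec_norm_lang_py lang out) := by unfold Spec_norm_lang_py; infer_instance

-- ===== CLAIM (what is proved, stated in full; the proofs are below) =====
def Claim_equal_norm_lang_py : Prop := ∀ (lang : Option String), Dom_norm_lang_py lang → Spec_norm_lang_py lang (norm_lang_py lang)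

-- ===== LEMMAS AND PROOFS =====

-- canonical collapsed form, pairwise view
def collapse : List Char → List Char
  | [] => []
  | [c] => [c]
  | a :: b :: t => if a = '-' ∧ b = '-' then collapse (b :: t) else a :: collapse (b :: t)

-- canonical collapsed form, state-passing view (p = "last emitted char was '-'")
def collapseP : Bool → List Char → List Char
  | _, [] => []
  | p, c :: t => if c = '-' ∧ p then collapseP true t else c :: collapseP (c = '-') t

theorem collapse_cons (c : Char) (t : List Char) :
    collapse (c :: t) = c :: collapseP (c = '-') t := by
  induction t generalizing c with
  | nil => simp [collapse, collapseP]
  | cons b u ih =>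
    by_cases hcb : c = '-' ∧ b = '-'
    · simp [collapse, hcb, ih, collapseP, hcb.1, hcb.2]
    · rw [collapse, if_neg hcb, ih]
      rcases Classical.em (c = '-') with hc | hc
      · have hb : ¬ b = '-' := fun hb => hcb ⟨hc, hb⟩
        simp [collapseP, hc, hb]
      · simp [collapseP, hc]

theorem collapse_eq_collapseP (l : List Char) : collapse l = collapseP false l := by
  cases l with
  | nil => rfl
  | cons c t => rw [collapse_cons]; simp [collapseP]

theorem collapse_of_not_infix (l : List Char) (h : ¬ ['-', '-'] <:+: l) : collapse l = l := by
  induction l with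
  | nil => rfl
  | cons a t ih =>
    have ht : ¬ ['-', '-'] <:+: t := fun hi => h (List.infix_cons_iff.2 (Or.inr hi))
    cases t with
    | nil => rfl
    | cons b u =>
      have hab : ¬ (a = '-' ∧ b = '-') := by
        rintro ⟨h1, h2⟩
        exact h (List.infix_cons_iff.2 (Or.inl ⟨u, by simp [h1, h2]⟩))
      rw [collapse, if_neg hab, ih ht]

theorem collapse_cons_rep (t : List Char) (c : Char) :
    collapse (c :: rep t) = collapse (c :: t) := by
  induction t using rep.induct generalizing c with
  | case1 => rfl
  | case2 u ih =>
    rw [rep_two]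
    by_cases hc : c = '-'
    · subst hc
      rw [show collapse ('-' :: '-' :: rep u) = collapse ('-' :: rep u) from by
            simp [collapse],
          show collapse ('-' :: '-' :: '-' :: u) = collapse ('-' :: '-' :: u) from by
            simp [collapse],
          show collapse ('-' :: '-' :: u) = collapse ('-' :: u) from by simp [collapse],
          ih]
    · rw [show collapse (c :: '-' :: rep u) = c :: collapse ('-' :: rep u) from by
            rw [collapse, if_neg (fun hh => hc hh.1)],
          show collapse (c :: '-' :: '-' :: u) = c :: collapse ('-' :: '-' :: u) from by
            rw [collapse, if_neg (fun hh => hc hh.1)],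
          show collapse ('-' :: '-' :: u) = collapse ('-' :: u) from by simp [collapse],
          ih]
  | case3 a u hne ih =>
    rw [rep_cons_ne a u hne]
    have key : collapse (a :: rep u) = collapse (a :: u) := ih a
    by_cases hca : c = '-' ∧ a = '-'
    · rw [show collapse (c :: a :: rep u) = collapse (a :: rep u) from by
            rw [collapse, if_pos hca],
          show collapse (c :: a :: u) = collapse (a :: u) from by
            rw [collapse, if_pos hca], key]
    · rw [show collapse (c :: a :: rep u) = c :: collapse (a :: rep u) from by
            rw [collapse, if_neg hca],
          show collapse (c :: a :: u) = c :: collapse (a :: u) from by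
            rw [collapse, if_neg hca], key]

theorem collapse_rep (l : List Char) : collapse (rep l) = collapse l := by
  cases l with
  | nil => rfl
  | cons c t =>
    rcases t with _ | ⟨b, u⟩
    · rw [rep_cons_ne c [] (fun t1 _ h2 => by cases h2), rep.eq_1]
    · by_cases hcb : c = '-' ∧ b = '-'
      · obtain ⟨h1, h2⟩ := hcb; subst h1; subst h2
        rw [rep_two, collapse_cons_rep,
          show collapse ('-' :: '-' :: u) = collapse ('-' :: u) from by simp [collapse]]
      · rw [rep_cons_ne c (b :: u)
              (by intro t1 h1 h2; injection h2 with hb _; exact hcb ⟨h1, hb⟩),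
            collapse_cons_rep]

theorem collapseLoopA_eq_collapse (l : List Char) : collapseLoopA l = collapse l := by
  induction l using collapseLoopA.induct with
  | case1 s h ih =>
    rw [collapseLoopA, dif_pos h, ih, replace_eq_rep, collapse_rep]
  | case2 s h =>
    rw [collapseLoopA, dif_neg h,
      collapse_of_not_infix s ((PySem.Chars.isIn_eq_false_iff _ _).1 (by simpa using h))]

theorem foldl_eq_collapseP (l acc : List Char) :
    l.foldl (fun out ch => if ch == '-' && out.getLast? == some '-' then out else out ++ [ch]) acc
      = acc ++ collapseP (acc.getLast? == some '-') l := by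
  induction l generalizing acc with
  | nil => simp [collapseP]
  | cons c t ih =>
    by_cases h1 : c = '-'
    · by_cases h2 : acc.getLast? = some '-'
      · have hb : (c == '-' && acc.getLast? == some '-') = true := by simp [h1, h2]
        simp only [List.foldl_cons, hb, if_true, ih, collapseP, h2]
        simp [h1, h2]
      · have hb : (c == '-' && acc.getLast? == some '-') = false := by simp [h2]
        simp only [List.foldl_cons, hb, Bool.false_eq_true, if_false, ih, collapseP]
        have hlast : (acc ++ [c]).getLast? = some '-' := by simp [h1]
        simp [hlast, h1, h2]
    · have hb : (c == '-' && acc.getLast? == some '-') = false := by simp [h1]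
      simp only [List.foldl_cons, hb, Bool.false_eq_true, if_false, ih, collapseP]
      have hlast : ((acc ++ [c]).getLast? == some '-') = false := by simp [h1]
      have hc : (c == '-') = false := by simp [h1]
      simp only [ih, hlast]
      rw [if_neg (fun hh => h1 hh.1)]
      simp [h1]

theorem core_collapse (s2 : String) :
    String.ofList (collapseLoopA s2.toList)
      = String.ofList (s2.toList.foldl
          (fun out ch => if ch == '-' && out.getLast? == some '-' then out else out ++ [ch]) []) := by
  rw [collapseLoopA_eq_collapse, foldl_eq_collapseP, collapse_eq_collapseP]
  simp

-- ===== VERDICT (by name: the statement is the Claim_ definition above) =====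
theorem norm_spec_aux (s : String) :
    (if s == "" then ""
     else String.ofList (collapseLoopA (PySem.Str.lower (PySem.Str.replace s "_" "-")).toList))
      = (if s == "" then ""
         else String.ofList ((PySem.Str.lower (PySem.Str.replace s "_" "-")).toList.foldl
            (fun out ch => if ch == '-' && out.getLast? == some '-' then out else out ++ [ch]) [])) := by
  by_cases h : (s == "") = true
  · rw [if_pos h, if_pos h]
  · rw [if_neg h, if_neg h]
    exact core_collapse _

theorem norm_lang_py_spec : Claim_equal_norm_lang_py := by
  intro lang _
  unfold Spec_norm_lang_py norm_lang_py norm_lang_py_alt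
  exact norm_spec_aux _
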